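-- pv_equiv track=rewrite | github.com/4GeeksAcademy/zuljexmonthly-sales-analyzer-project | monthly_sales_analyzer.py | top_product
-- ===== SOURCE A (Python) =====
-- def top_product(data):
--     """Determines which product had the highest total sales in 30 days."""
--     totals= {}
--     for day in data:
--         for key, value in day.items():
--             if key.startswith("product_"):
--                 if key in totals:
--                     totals[key] += value
--                 else:
--                     totals[key] = value
--     best_product = max(totals, key = totals.get)
--     return best_product
-- ===== SOURCE B (Python) =====
-- def top_product(data):
--     """Determines which product had the highest total sales in 30 days."""
--     keys = list(dict.fromkeys(k for day in data for k in day if k.startswith("product_")))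
--     return max(keys, key=lambda p: sum(day.get(p, 0) for day in data))
-- ===== Notes on version B (the rewrite author's own statement) =====
-- stated objective: alternative
-- what changed: Instead of accumulating a running totals dict in one pass and argmaxing over it, B first builds the ordered list of distinct product_ keys (dict.fromkeys over a flattened key scan) and then takes max over that list, recomputing each product's total by re-scanning all days with day.get(p, 0).
import Mathlib
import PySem

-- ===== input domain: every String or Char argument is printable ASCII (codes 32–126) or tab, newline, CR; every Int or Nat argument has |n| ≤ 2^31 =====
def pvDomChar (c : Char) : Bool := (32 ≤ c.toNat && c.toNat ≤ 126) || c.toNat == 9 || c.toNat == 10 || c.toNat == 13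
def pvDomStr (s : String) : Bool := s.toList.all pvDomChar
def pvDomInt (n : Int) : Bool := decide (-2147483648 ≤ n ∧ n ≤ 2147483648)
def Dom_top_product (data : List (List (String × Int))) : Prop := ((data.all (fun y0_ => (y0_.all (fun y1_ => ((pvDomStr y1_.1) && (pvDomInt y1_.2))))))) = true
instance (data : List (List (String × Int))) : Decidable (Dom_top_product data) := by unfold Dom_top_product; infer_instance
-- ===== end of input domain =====

-- B replaces A's single accumulating pass + argmax over the totals dict by an ordered unique
-- product-key index followed by a per-key re-scan of the days (alternative decomposition, not faster).

-- ===== PORT A =====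
def top_product (data : List (List (String × Int))) : String :=
  let totals : PySem.Dict String Int :=
    data.foldl (fun totals day =>
      day.foldl (fun totals kv =>
        if PySem.Str.startswith kv.1 "product_" then
          (if totals.contains kv.1 then totals.modify kv.1 0 (· + kv.2)
           else totals.insert kv.1 kv.2)
        else totals) totals) (PySem.Dict.mk [])
  (PySem.List.max? totals.keys (fun k => totals.getD k 0)).getD ""

-- ===== PORT B =====
def top_product_alt (data : List (List (String × Int))) : String :=
  let keys : List String :=
    PySem.List.dedup ((data.flatMap (fun day => day.map (fun kv => kv.1))).filter
      (fun k => PySem.Str.startswith k "product_"))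
  (PySem.List.max? keys
    (fun p => (data.map (fun day => PySem.Dict.getD (PySem.Dict.mk day) p 0)).sum)).getD ""

-- ===== PRECONDITION & SPEC =====
-- Pre_ excludes (a) inputs with no "product_" key at all, on which Python A (and B) raises
-- ValueError from max() over an empty iterable, and (b) days whose association list repeats a
-- key, which do not represent any Python dict (dicts have unique keys).
def Pre_top_product (data : List (List (String × Int))) : Prop :=
  (∀ day ∈ data, (day.map Prod.fst).Nodup) ∧
  data.any (fun day => day.any (fun kv => PySem.Str.startswith kv.1 "product_")) = true
instance (data : List (List (String × Int))) : Decidable (Pre_top_product data) := by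
  unfold Pre_top_product; infer_instance
def pvWitness_top_product : (List (List (String × Int))) :=
  [[("product_a", 3)], [("product_a", 2), ("product_b", 4)]]

def Spec_top_product (data : List (List (String × Int))) (out : String) : Prop := out = top_product_alt data
instance (data : List (List (String × Int))) (out : String) : Decidable (Spec_top_product data out) := by unfold Spec_top_product; infer_instance

-- ===== CLAIM (what is proved, stated in full; the proofs are below) =====
def Claim_equal_top_product : Prop := ∀ (data : List (List (String × Int))), Dom_top_product data → Pre_top_product data → Spec_top_product data (top_product data)

-- ===== LEMMAS AND PROOFS =====
def pvIns (t : PySem.Dict String Int) (kv : String × Int) : PySem.Dict String Int :=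
  t.insert kv.1 (t.getD kv.1 0 + kv.2)

theorem pv_contains_get? (t : PySem.Dict String Int) (k : String) :
    t.contains k = (t.get? k).isSome := by
  simp [PySem.Dict.contains, PySem.Dict.get?, List.isSome_find?]

theorem pv_get?_eq_none (t : PySem.Dict String Int) (k : String)
    (h : t.contains k = false) : t.get? k = none := by
  rw [pv_contains_get?] at h
  exact Option.not_isSome_iff_eq_none.1 (by simp [h])

theorem pv_stepA_eq (t : PySem.Dict String Int) (kv : String × Int) :
    (if PySem.Str.startswith kv.1 "product_" then
       (if t.contains kv.1 then t.modify kv.1 0 (· + kv.2) else t.insert kv.1 kv.2)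
     else t)
    = (if PySem.Str.startswith kv.1 "product_" then pvIns t kv else t) := by
  unfold pvIns PySem.Dict.modify
  by_cases h : t.contains kv.1
  · simp [h]
  · simp only [Bool.not_eq_true] at h
    simp [h, PySem.Dict.getD, pv_get?_eq_none t kv.1 h]

theorem pv_keys_insert (t : PySem.Dict String Int) (k : String) (v : Int) :
    (t.insert k v).items.map Prod.fst
      = if t.contains k then t.items.map Prod.fst else t.items.map Prod.fst ++ [k] := by
  unfold PySem.Dict.insert
  by_cases h : t.contains k
  · simp only [h, if_true, List.map_map]
    apply List.map_congr_left
    intro p _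
    by_cases hpk : p.1 = k
    · simp [hpk]
    · simp [hpk]
  · simp [h]

theorem pv_contains_insert (t : PySem.Dict String Int) (k k' : String) (v : Int) :
    (t.insert k v).contains k' = (t.contains k' || (k' == k)) := by
  rw [pv_contains_get?, pv_contains_get?]
  by_cases hk : k' = k
  · subst hk; simp [PySem.Dict.get?_insert_self]
  · rw [PySem.Dict.get?_insert_of_ne t v hk]
    simp [hk]

theorem pv_nodup_insert (t : PySem.Dict String Int) (k : String) (v : Int)
    (h : (t.items.map Prod.fst).Nodup) : ((t.insert k v).items.map Prod.fst).Nodup := by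
  rw [pv_keys_insert]
  by_cases hc : t.contains k
  · simp [hc, h]
  · rw [if_neg hc]
    rw [List.nodup_append]
    refine ⟨h, List.nodup_singleton _, ?_⟩
    intro a ha b hb
    rw [List.mem_singleton] at hb
    subst hb
    intro hak
    subst hak
    simp only [Bool.not_eq_true, PySem.Dict.contains, List.any_eq_false] at hc
    simp only [List.mem_map] at ha
    obtain ⟨p, hp, hpa⟩ := ha
    have hfa := hc p hp
    rw [hpa] at hfa
    simp at hfa

theorem pv_getD_insert (t : PySem.Dict String Int) (k k' : String) (v : Int) :
    (t.insert k v).getD k' 0 = if k' = k then v else t.getD k' 0 := by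
  by_cases h : k' = k
  · subst h; simp [PySem.Dict.getD, PySem.Dict.get?_insert_self]
  · simp [PySem.Dict.getD, PySem.Dict.get?_insert_of_ne t v h, h]

def pvS (q : List (String × Int)) (k : String) : Int :=
  ((q.filter (fun kv => kv.1 == k)).map Prod.snd).sum

theorem pv_find?_nodup (l : List (String × Int)) (p : String × Int)
    (h : (l.map Prod.fst).Nodup) (hp : p ∈ l) : l.find? (fun q => q.1 == p.1) = some p := by
  induction l with
  | nil => cases hp
  | cons q0 rest ih =>
    simp only [List.map_cons, List.nodup_cons] at h
    rcases List.mem_cons.1 hp with hpe | hpr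
    · subst hpe
      simp [List.find?_cons_of_pos]
    · have hne : (q0.1 == p.1) = false := by
        rw [beq_eq_false_iff_ne]
        intro he
        exact h.1 (by rw [he]; exact List.mem_map.2 ⟨p, hpr, rfl⟩)
      rw [List.find?_cons, hne]
      show List.find? _ rest = some p
      exact ih h.2 hpr

theorem pv_items_self (t : PySem.Dict String Int) (h : (t.items.map Prod.fst).Nodup) :
    (t.items.map Prod.fst).map (fun k => (k, t.getD k 0)) = t.items := by
  rw [List.map_map]
  conv_rhs => rw [← List.map_id t.items]
  apply List.map_congr_left
  intro p hp
  have : t.get? p.1 = some p.2 := by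
    simp [PySem.Dict.get?, pv_find?_nodup t.items p h hp]
  simp [Function.comp, PySem.Dict.getD, this]

theorem pv_getD_day (day : List (String × Int)) (k : String)
    (h : (day.map Prod.fst).Nodup) : PySem.Dict.getD (PySem.Dict.mk day) k 0 = pvS day k := by
  induction day with
  | nil => rfl
  | cons q0 rest ih =>
    simp only [List.map_cons, List.nodup_cons] at h
    by_cases hk : q0.1 = k
    · have hrest : rest.filter (fun kv => kv.1 == k) = [] := by
        rw [List.filter_eq_nil_iff]
        intro kv hkv
        simp only [beq_iff_eq]
        intro he
        exact h.1 (by rw [hk, ← he]; exact List.mem_map.2 ⟨kv, hkv, rfl⟩)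
      simp [PySem.Dict.getD, PySem.Dict.get?, List.find?_cons_of_pos, hk, pvS, hrest]
    · have hb : (q0.1 == k) = false := by simp [hk]
      have := ih h.2
      simp only [PySem.Dict.getD, PySem.Dict.get?] at this ⊢
      rw [List.find?_cons, hb]
      show (Option.map _ (List.find? _ rest)).getD 0 = _
      simp only [pvS, List.filter_cons, hb]
      simpa [pvS] using this

theorem pv_getD_table (keys : List String) (f : String → Int) (k : String)
    (hnd : keys.Nodup) (hk : k ∈ keys) :
    PySem.Dict.getD (PySem.Dict.mk (keys.map (fun k => (k, f k)))) k 0 = f k := by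
  induction keys with
  | nil => cases hk
  | cons k0 rest ih =>
    simp only [List.nodup_cons] at hnd
    by_cases he : k0 = k
    · subst he
      simp [PySem.Dict.getD, PySem.Dict.get?, List.find?_cons_of_pos]
    · have hb : (k0 == k) = false := by simp [he]
      have hkr : k ∈ rest := by
        rcases List.mem_cons.1 hk with h1 | h2
        · exact absurd h1.symm he
        · exact h2
      have := ih hnd.2 hkr
      simp only [PySem.Dict.getD, PySem.Dict.get?, List.map_cons] at this ⊢
      rw [List.find?_cons, hb]
      exact this

theorem pv_max?_aux (f g : String → Int) : ∀ (xs : List String) (a : String),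
    (∀ x ∈ a :: xs, f x = g x) →
    PySem.List.max? (a :: xs) f = PySem.List.max? (a :: xs) g := by
  intro xs
  induction xs with
  | nil => intro a _; rfl
  | cons x rest ih =>
    intro a h
    have ha : f a = g a := h a (by simp)
    have hx : f x = g x := h x (by simp)
    have e1 : ∀ (F : String → Int), PySem.List.max? (a :: x :: rest) F
        = PySem.List.max? ((if F a < F x then x else a) :: rest) F := by
      intro F
      unfold PySem.List.max?
      simp only [List.foldl_cons]
      by_cases hlt : F a < F x <;> simp [hlt]
    rw [e1 f, e1 g, ha, hx]
    apply ih
    intro y hy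
    rcases List.mem_cons.1 hy with h1 | h2
    · subst h1
      by_cases hlt : g a < g x <;> simp [hlt, hx, ha]
    · exact h y (by simp [h2])

theorem pv_max?_congr (xs : List String) (f g : String → Int)
    (h : ∀ x ∈ xs, f x = g x) : PySem.List.max? xs f = PySem.List.max? xs g := by
  cases xs with
  | nil => rfl
  | cons x rest => exact pv_max?_aux f g rest x h

theorem pv_loop_items : ∀ (q : List (String × Int)) (t : PySem.Dict String Int),
    (t.items.map Prod.fst).Nodup →
    (q.foldl pvIns t).items
      = (t.items.map Prod.fst
          ++ (PySem.List.dedup (q.map Prod.fst)).filter (fun k => !(t.contains k))).map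
          (fun k => (k, t.getD k 0 + pvS q k)) := by
  intro q
  induction q with
  | nil =>
    intro t h
    simp only [List.foldl_nil, List.map_nil]
    rw [show PySem.List.dedup ([] : List String) = [] from rfl]
    simp only [List.filter_nil, List.append_nil]
    rw [show (fun k => (k, t.getD k 0 + pvS [] k)) = (fun k => (k, t.getD k 0)) by
      funext k; simp [pvS]]
    exact (pv_items_self t h).symm
  | cons kv q ih =>
    intro t h
    obtain ⟨k, v⟩ := kv
    simp only [List.foldl_cons]
    have hIns : pvIns t (k, v) = t.insert k (t.getD k 0 + v) := rfl
    rw [hIns, ih _ (pv_nodup_insert t k _ h)]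
    -- the mapped functions agree
    have hfun : (fun k' => (k', (t.insert k (t.getD k 0 + v)).getD k' 0 + pvS q k'))
        = (fun k' => (k', t.getD k' 0 + pvS ((k, v) :: q) k')) := by
      funext k'
      rw [pv_getD_insert]
      by_cases he : k' = k
      · subst he
        simp [pvS]
        ring
      · have hkk : ¬k = k' := fun e => he e.symm
        simp [pvS, he, hkk]
    rw [hfun]
    -- the key lists agree
    have hcontains : (fun k' => !((t.insert k (t.getD k 0 + v)).contains k'))
        = (fun k' => !(t.contains k' || (k' == k))) := by
      funext k'; rw [pv_contains_insert]
    have hdedup : PySem.List.dedup (((k, v) :: q).map Prod.fst)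
        = k :: (PySem.List.dedup (q.map Prod.fst)).filter (fun y => !(y == k)) := by
      simp only [List.map_cons]
      change PySem.Set.ofList (k :: q.map Prod.fst)
        = k :: (PySem.Set.ofList (q.map Prod.fst)).filter (fun y => !(y == k))
      rw [PySem.Set.ofList_cons]
      rfl
    have hfilt : (PySem.List.dedup (q.map Prod.fst)).filter (fun k' => !(t.contains k' || (k' == k)))
        = ((PySem.List.dedup (q.map Prod.fst)).filter (fun y => !(y == k))).filter
            (fun k' => !(t.contains k')) := by
      rw [List.filter_filter]
      apply List.filter_congr
      intro y _
      cases hyk : (y == k) <;> cases hcy : t.contains y <;> simp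
    have hkeys : (t.insert k (t.getD k 0 + v)).items.map Prod.fst
          ++ (PySem.List.dedup (q.map Prod.fst)).filter
              (fun k' => !((t.insert k (t.getD k 0 + v)).contains k'))
        = t.items.map Prod.fst
          ++ (PySem.List.dedup (((k, v) :: q).map Prod.fst)).filter (fun k' => !(t.contains k')) := by
      rw [pv_keys_insert, hcontains, hdedup, List.filter_cons, hfilt]
      by_cases hc : t.contains k
      · rw [if_pos hc]
        simp only [hc, Bool.not_true, Bool.false_eq_true, if_false]
      · rw [if_neg hc]
        have hc' : t.contains k = false := by simpa using hc
        simp only [hc', Bool.not_false, if_true]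
        rw [List.append_assoc]
        rfl
    rw [hkeys]

theorem pv_map_fst_filter (l : List (String × Int)) (p : String → Bool) :
    (l.filter (fun kv => p kv.1)).map Prod.fst = (l.map Prod.fst).filter p := by
  simp [List.filter_map]; rfl

theorem pv_sum_days (data : List (List (String × Int))) (k : String)
    (hsw : PySem.Str.startswith k "product_" = true)
    (hnd : ∀ day ∈ data, (day.map Prod.fst).Nodup) :
    pvS (data.flatten.filter (fun kv => PySem.Str.startswith kv.1 "product_")) k
      = (data.map (fun day => PySem.Dict.getD (PySem.Dict.mk day) k 0)).sum := by
  unfold pvS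
  rw [List.filter_filter]
  rw [List.filter_congr (q := fun kv => kv.1 == k) ?hpt]
  case hpt =>
    intro kv _
    cases hk2 : (kv.1 == k)
    · simp [hk2]
    · have he : kv.1 = k := beq_iff_eq.1 hk2
      simp only [he, hsw, Bool.true_and]
      exact (beq_self_eq_true k).symm
  rw [List.filter_flatten, List.map_flatten, List.sum_flatten, List.map_map, List.map_map]
  refine congrArg List.sum (List.map_congr_left ?_)
  intro day hday
  rw [pv_getD_day day k (hnd day hday)]
  rfl

theorem pv_top_eq (data : List (List (String × Int)))
    (hnd : ∀ day ∈ data, (day.map Prod.fst).Nodup) :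
    top_product data = top_product_alt data := by
  simp only [top_product, top_product_alt]
  -- A's nested loop is the loop over the flattened pair list
  rw [← List.foldl_flatten]
  rw [show (fun (totals : PySem.Dict String Int) (kv : String × Int) =>
        if PySem.Str.startswith kv.1 "product_" then
          (if totals.contains kv.1 then totals.modify kv.1 0 (· + kv.2)
           else totals.insert kv.1 kv.2)
        else totals)
      = (fun t kv => if PySem.Str.startswith kv.1 "product_" then pvIns t kv else t) by
    funext t kv; exact pv_stepA_eq t kv]
  rw [PySem.List.foldl_if_eq_foldl_filter]
  have hitems := pv_loop_items
      (data.flatten.filter (fun kv => PySem.Str.startswith kv.1 "product_"))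
      (PySem.Dict.mk []) (by simp)
  simp only [List.map_nil, List.nil_append] at hitems
  rw [show (fun k => !(PySem.Dict.mk ([] : List (String × Int))).contains k)
      = (fun _ : String => true) from funext (fun _ => rfl), List.filter_true] at hitems
  rw [show (fun k => (k, (PySem.Dict.mk ([] : List (String × Int))).getD k 0
        + pvS (data.flatten.filter (fun kv => PySem.Str.startswith kv.1 "product_")) k))
      = (fun k => (k, pvS (data.flatten.filter (fun kv => PySem.Str.startswith kv.1 "product_")) k)) by
    funext k
    simp [PySem.Dict.getD, PySem.Dict.get?]] at hitems
  have hTeq : (List.foldl pvIns (PySem.Dict.mk [])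
        (data.flatten.filter (fun kv => PySem.Str.startswith kv.1 "product_")))
      = PySem.Dict.mk ((PySem.List.dedup
          ((data.flatten.filter (fun kv => PySem.Str.startswith kv.1 "product_")).map Prod.fst)).map
            (fun k => (k, pvS (data.flatten.filter
              (fun kv => PySem.Str.startswith kv.1 "product_")) k))) :=
    PySem.Dict.ext hitems
  rw [hTeq]
  -- identify the two key lists
  have hkeysB : (PySem.List.dedup
        ((data.flatten.filter (fun kv => PySem.Str.startswith kv.1 "product_")).map Prod.fst))
      = PySem.List.dedup ((data.flatMap (fun day => day.map (fun kv => kv.1))).filter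
          (fun k => PySem.Str.startswith k "product_")) := by
    rw [pv_map_fst_filter data.flatten (fun k => PySem.Str.startswith k "product_")]
    congr 1
    rw [List.map_flatten, List.flatMap_def]
  rw [show (PySem.Dict.mk ((PySem.List.dedup
      ((data.flatten.filter (fun kv => PySem.Str.startswith kv.1 "product_")).map Prod.fst)).map
        (fun k => (k, pvS (data.flatten.filter (fun kv => PySem.Str.startswith kv.1 "product_")) k)))).keys
    = PySem.List.dedup ((data.flatten.filter
        (fun kv => PySem.Str.startswith kv.1 "product_")).map Prod.fst) by
    rw [show ∀ (L : List (String × Int)), (PySem.Dict.mk L).keys = L.map Prod.fst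
      from fun _ => rfl]
    rw [List.map_map]
    show List.map (fun k => k) _ = _
    exact List.map_id' _]
  rw [hkeysB]
  congr 1
  apply pv_max?_congr
  intro x hx
  have hsw : PySem.Str.startswith x "product_" = true := by
    have hx2 := (PySem.List.mem_dedup _ _).1 hx
    exact (List.mem_filter.1 hx2).2
  rw [pv_getD_table _ _ _ ?nd hx]
  · exact pv_sum_days data x hsw hnd
  case nd => exact PySem.Set.nodup_ofList _

-- ===== VERDICT (by name: the statement is the Claim_ definition above) =====
theorem top_product_spec : Claim_equal_top_product := by
  intro data _hdom hpre
  unfold Spec_top_product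
  exact pv_top_eq data hpre.1
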